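-- pv_equiv track=rewrite | github.com/noalj314/tdde23 | lab3/lab3.py | move_piece
-- ===== SOURCE A (Python) =====
-- def is_free(board, xfree, yfree):
--     for i in board:
--         if (xfree, yfree) in board[i]:
--             return False
--     else:
--         return True
--
-- def move_piece(board, xgammal, ygammal, xny, yny):
--     for i in board:
--         if (xgammal, ygammal) in board[i] and is_free(board, xny, yny) == True:
--             index = board[i].index((xgammal, ygammal))
--             board[i].pop(index)
--             board[i].insert(index, (xny, yny))
--             return True
--     else:
--         return False
-- ===== SOURCE B (Python) =====
-- def move_piece(board, xgammal, ygammal, xny, yny):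
--     # One pass: collect every occupied cell and the first position of the piece.
--     occupied = set()
--     found = None
--     for key, cells in board.items():
--         for idx, cell in enumerate(cells):
--             occupied.add(cell)
--             if found is None and cell == (xgammal, ygammal):
--                 found = (key, idx)
--     if found is not None and (xny, yny) not in occupied:
--         key, idx = found
--         board[key][idx] = (xny, yny)
--         return True
--     return False
-- ===== Notes on version B (the rewrite author's own statement) =====
-- stated objective: alternative
-- what changed: Replaces the outer loop whose guard re-runs the full is_free scan at every key containing the piece by a single pass that builds the occupied-cell set and records the first (key, index) of the piece, then decides and mutates once.
import Mathlib
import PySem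

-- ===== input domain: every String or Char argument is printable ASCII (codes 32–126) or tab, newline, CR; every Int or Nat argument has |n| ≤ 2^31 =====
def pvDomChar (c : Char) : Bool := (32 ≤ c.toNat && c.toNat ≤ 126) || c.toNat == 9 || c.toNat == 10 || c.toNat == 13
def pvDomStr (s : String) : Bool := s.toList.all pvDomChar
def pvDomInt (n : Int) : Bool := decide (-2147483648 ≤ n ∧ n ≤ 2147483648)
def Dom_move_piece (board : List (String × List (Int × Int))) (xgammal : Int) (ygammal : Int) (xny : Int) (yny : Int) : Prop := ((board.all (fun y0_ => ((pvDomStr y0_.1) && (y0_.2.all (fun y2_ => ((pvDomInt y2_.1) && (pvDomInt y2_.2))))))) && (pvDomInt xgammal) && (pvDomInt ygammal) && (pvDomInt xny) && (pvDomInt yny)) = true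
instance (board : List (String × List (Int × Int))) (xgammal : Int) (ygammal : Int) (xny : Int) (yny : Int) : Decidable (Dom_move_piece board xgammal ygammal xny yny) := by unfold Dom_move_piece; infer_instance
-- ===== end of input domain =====

-- B replaces A's outer-loop-plus-inner-is_free-scan by one pass maintaining an occupied set and
-- the piece's first position. Both Pythons mutate board identically; the claim is about the
-- returned Bool only (the mutation steps of both Pythons do not affect it and are not modelled).

-- ===== PORT A =====
-- 'for i in board' iterates the dict's entries; 'board[i]' is the entry's value kv.2.
def pvIsFreeGo (xfree yfree : Int) : List (String × List (Int × Int)) → Bool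
  | [] => true
  | kv :: rest => if kv.2.contains (xfree, yfree) then false else pvIsFreeGo xfree yfree rest

def is_free (board : List (String × List (Int × Int))) (xfree yfree : Int) : Bool :=
  pvIsFreeGo xfree yfree board

-- the index/pop/insert mutation of A happens just before 'return True' and does not affect the result
def pvMoveGo (full : List (String × List (Int × Int))) (xg yg xn yn : Int) :
    List (String × List (Int × Int)) → Bool
  | [] => false
  | kv :: rest =>
      if kv.2.contains (xg, yg) && (is_free full xn yn == true) then true
      else pvMoveGo full xg yg xn yn rest

def move_piece (board : List (String × List (Int × Int))) (xgammal : Int) (ygammal : Int) (xny : Int) (yny : Int) : Bool :=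
  pvMoveGo board xgammal ygammal xny yny board

-- ===== PORT B =====
-- inner 'for idx, cell in enumerate(cells)' loop of B
def pvScanCells (xg yg : Int) (key : String) :
    List (Int × Int) → Nat → PySem.Set (Int × Int) × Option (String × Nat) →
    PySem.Set (Int × Int) × Option (String × Nat)
  | [], _, acc => acc
  | c :: cs, idx, (occ, found) =>
      pvScanCells xg yg key cs (idx + 1)
        (PySem.Set.add occ c,
         if found.isNone && (c == (xg, yg)) then some (key, idx) else found)

-- outer 'for key, cells in board.items()' loop of B
def pvScanBoard (xg yg : Int) :
    List (String × List (Int × Int)) → PySem.Set (Int × Int) × Option (String × Nat) →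
    PySem.Set (Int × Int) × Option (String × Nat)
  | [], acc => acc
  | (k, cs) :: rest, acc => pvScanBoard xg yg rest (pvScanCells xg yg k cs 0 acc)

-- B mutates board[key][idx] just before 'return True'; the returned Bool is modelled
def move_piece_alt (board : List (String × List (Int × Int))) (xgammal : Int) (ygammal : Int) (xny : Int) (yny : Int) : Bool :=
  let acc := pvScanBoard xgammal ygammal board (PySem.Set.empty, none)
  if acc.2.isSome && !(PySem.Set.contains acc.1 (xny, yny)) then true else false

-- ===== PRECONDITION & SPEC =====
def Spec_move_piece (board : List (String × List (Int × Int))) (xgammal : Int) (ygammal : Int) (xny : Int) (yny : Int) (out : Bool) : Prop := out = move_piece_alt board xgammal ygammal xny yny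
instance (board : List (String × List (Int × Int))) (xgammal : Int) (ygammal : Int) (xny : Int) (yny : Int) (out : Bool) : Decidable (Spec_move_piece board xgammal ygammal xny yny out) := by unfold Spec_move_piece; infer_instance

-- ===== CLAIM (what is proved, stated in full; the proofs are below) =====
def Claim_equal_move_piece : Prop := ∀ (board : List (String × List (Int × Int))) (xgammal : Int) (ygammal : Int) (xny : Int) (yny : Int), Dom_move_piece board xgammal ygammal xny yny → Spec_move_piece board xgammal ygammal xny yny (move_piece board xgammal ygammal xny yny)

-- ===== LEMMAS AND PROOFS =====

theorem pvIsFreeGo_eq_not_any (x y : Int) (l : List (String × List (Int × Int))) :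
    pvIsFreeGo x y l = !(l.any fun kv => kv.2.contains (x, y)) := by
  induction l with
  | nil => rfl
  | cons kv rest ih =>
      simp only [pvIsFreeGo, List.any_cons, ih]
      cases h : kv.2.contains (x, y) <;> simp

theorem pvMoveGo_eq (full : List (String × List (Int × Int))) (xg yg xn yn : Int)
    (l : List (String × List (Int × Int))) :
    pvMoveGo full xg yg xn yn l =
      ((l.any fun kv => kv.2.contains (xg, yg)) && is_free full xn yn) := by
  induction l with
  | nil => rfl
  | cons kv rest ih =>
      simp only [pvMoveGo, List.any_cons, ih]
      by_cases h : kv.2.contains (xg, yg) = true <;>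
        by_cases hf : is_free full xn yn = true <;> simp [hf, Bool.and_comm]

theorem pvScanCells_fst (xg yg : Int) (key : String) (cs : List (Int × Int)) (idx : Nat)
    (occ : PySem.Set (Int × Int)) (found : Option (String × Nat)) (x : Int × Int) :
    ((pvScanCells xg yg key cs idx (occ, found)).1.contains x) =
      (occ.contains x || cs.contains x) := by
  induction cs generalizing idx occ found with
  | nil => simp [pvScanCells]
  | cons c cs ih =>
      simp only [pvScanCells, ih, List.contains_cons]
      by_cases h1 : x = c <;> by_cases h2 : x ∈ occ <;> by_cases h3 : x ∈ cs <;>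
        simp [PySem.Set.mem_add, h1, h2, h3]

theorem pvScanCells_snd (xg yg : Int) (key : String) (cs : List (Int × Int)) (idx : Nat)
    (occ : PySem.Set (Int × Int)) (found : Option (String × Nat)) :
    ((pvScanCells xg yg key cs idx (occ, found)).2.isSome) =
      (found.isSome || cs.contains (xg, yg)) := by
  induction cs generalizing idx occ found with
  | nil => simp [pvScanCells]
  | cons c cs ih =>
      simp only [pvScanCells, ih, List.contains_cons]
      cases found with
      | some f => simp
      | none =>
          by_cases h : (c == (xg, yg)) = true
          · rw [beq_iff_eq] at h
            subst h
            simp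
          · rw [beq_iff_eq] at h
            have h2 : ¬((xg, yg) : Int × Int) = c := fun he => h he.symm
            simp [if_neg h, h2]

theorem pvScanBoard_fst (xg yg : Int) (l : List (String × List (Int × Int)))
    (occ : PySem.Set (Int × Int)) (found : Option (String × Nat)) (x : Int × Int) :
    ((pvScanBoard xg yg l (occ, found)).1.contains x) =
      (occ.contains x || l.any fun kv => kv.2.contains x) := by
  induction l generalizing occ found with
  | nil => simp [pvScanBoard]
  | cons kv rest ih =>
      obtain ⟨k, cs⟩ := kv
      have : pvScanCells xg yg k cs 0 (occ, found) =
        ((pvScanCells xg yg k cs 0 (occ, found)).1, (pvScanCells xg yg k cs 0 (occ, found)).2) := rfl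
      simp only [pvScanBoard, List.any_cons]
      rw [this, ih, pvScanCells_fst]
      simp [Bool.or_assoc]

theorem pvScanBoard_snd (xg yg : Int) (l : List (String × List (Int × Int)))
    (occ : PySem.Set (Int × Int)) (found : Option (String × Nat)) :
    ((pvScanBoard xg yg l (occ, found)).2.isSome) =
      (found.isSome || l.any fun kv => kv.2.contains (xg, yg)) := by
  induction l generalizing occ found with
  | nil => simp [pvScanBoard]
  | cons kv rest ih =>
      obtain ⟨k, cs⟩ := kv
      have : pvScanCells xg yg k cs 0 (occ, found) =
        ((pvScanCells xg yg k cs 0 (occ, found)).1, (pvScanCells xg yg k cs 0 (occ, found)).2) := rfl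
      simp only [pvScanBoard, List.any_cons]
      rw [this, ih, pvScanCells_snd]
      simp [Bool.or_assoc]

-- ===== VERDICT (by name: the statement is the Claim_ definition above) =====
theorem move_piece_spec : Claim_equal_move_piece := by
  intro board xg yg xn yn _
  unfold Spec_move_piece move_piece move_piece_alt
  rw [pvMoveGo_eq]
  have h1 := pvScanBoard_snd xg yg board (PySem.Set.empty) none
  have h2 := pvScanBoard_fst xg yg board (PySem.Set.empty) none (xn, yn)
  simp only [Option.isSome_none, Bool.false_or] at h1
  have hemp : (PySem.Set.empty : PySem.Set (Int × Int)).contains (xn, yn) = false := rfl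
  rw [hemp, Bool.false_or] at h2
  simp only [h1, h2, is_free, pvIsFreeGo_eq_not_any]
  cases ha : (board.any fun kv => kv.2.contains (xg, yg)) <;>
    cases hb : (board.any fun kv => kv.2.contains (xn, yn)) <;> simp
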